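-- pv_equiv track=rewrite | github.com/Michaszek224/praktykaiszeregowaniezadan | zadanie1/algorytmy2/156935.py | total_lateness
-- ===== SOURCE A (Python) =====
-- def batch_lateness(batch, completion_time):
--     # batch: lista (id, p, d)
--     return sum(max(0, completion_time - d) for _, _, d in batch)
--
-- def total_lateness(batches, setup_time):
--     total = 0
--     t = 0
--     first = True
--     for batch in batches:
--         if not batch:
--             continue
--         if not first:
--             t += setup_time
--         t += sum(p for _, p, _ in batch)
--         total += batch_lateness(batch, t)
--         first = False
--     return total
-- ===== SOURCE B (Python) =====
-- def total_lateness(batches, setup_time):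
--     nonempty = [b for b in batches if b]
--     if not nonempty:
--         return 0
--     # closed-form completion time of the LAST batch, then walk the schedule backwards
--     ct = sum(p for b in nonempty for _, p, _ in b) + setup_time * (len(nonempty) - 1)
--     total = 0
--     for b in reversed(nonempty):
--         total += sum(max(0, ct - d) for _, _, d in b)
--         ct -= sum(p for _, p, _ in b) + setup_time
--     return total
-- ===== Notes on version B (the rewrite author's own statement) =====
-- stated objective: alternative
-- what changed: A runs the clock forward through the batches with a first-flag; B computes the last batch's completion time in closed form (total processing + setup*(k-1)) and then traverses the non-empty batches BACKWARDS, rewinding the clock by each batch's processing sum plus setup while accumulating lateness.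
import Mathlib
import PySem

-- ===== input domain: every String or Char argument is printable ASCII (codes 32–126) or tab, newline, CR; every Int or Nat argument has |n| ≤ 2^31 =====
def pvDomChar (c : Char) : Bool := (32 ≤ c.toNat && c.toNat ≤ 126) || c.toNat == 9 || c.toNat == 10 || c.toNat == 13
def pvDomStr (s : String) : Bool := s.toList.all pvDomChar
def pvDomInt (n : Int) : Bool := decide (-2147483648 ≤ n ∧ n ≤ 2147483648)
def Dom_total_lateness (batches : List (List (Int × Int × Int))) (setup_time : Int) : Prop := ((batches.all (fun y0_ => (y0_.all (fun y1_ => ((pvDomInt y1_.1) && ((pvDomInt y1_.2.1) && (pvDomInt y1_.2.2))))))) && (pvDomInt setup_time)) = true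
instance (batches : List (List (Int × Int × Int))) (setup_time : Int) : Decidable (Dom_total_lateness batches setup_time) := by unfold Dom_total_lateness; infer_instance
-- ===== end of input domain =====

-- B replaces A's forward clock-with-first-flag loop by a closed-form last completion time followed by a BACKWARD traversal that rewinds the clock (alternative decomposition, same cost).


-- ===== PORT A =====
-- batch_lateness(batch, completion_time)
def batch_lateness (batch : List (Int × Int × Int)) (completion_time : Int) : Int :=
  batch.foldl (fun acc x => acc + max 0 (completion_time - x.2.2)) 0

def total_lateness (batches : List (List (Int × Int × Int))) (setup_time : Int) : Int :=
  (batches.foldl (fun (s : Int × Int × Bool) batch =>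
      if batch = [] then s
      else
        let t1 := if s.2.2 then s.2.1 else s.2.1 + setup_time
        let t2 := t1 + batch.foldl (fun a x => a + x.2.1) 0
        (s.1 + batch_lateness batch t2, t2, false))
    (0, 0, true)).1

-- ===== PORT B =====
def total_lateness_alt (batches : List (List (Int × Int × Int))) (setup_time : Int) : Int :=
  let nonempty := batches.filter (fun b => b ≠ [])
  if nonempty = [] then 0
  else
    -- closed-form completion time of the last batch
    let ct0 := nonempty.foldl (fun a b => b.foldl (fun a2 x => a2 + x.2.1) a) 0
                 + setup_time * ((nonempty.length : Int) - 1)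
    -- walk the schedule backwards, rewinding the clock
    (nonempty.reverse.foldl
      (fun (st : Int × Int) b =>
        (st.1 + b.foldl (fun a x => a + max 0 (st.2 - x.2.2)) 0,
         st.2 - (b.foldl (fun a x => a + x.2.1) 0 + setup_time)))
      (0, ct0)).1

-- ===== PRECONDITION & SPEC =====
def Spec_total_lateness (batches : List (List (Int × Int × Int))) (setup_time : Int) (out : Int) : Prop := out = total_lateness_alt batches setup_time
instance (batches : List (List (Int × Int × Int))) (setup_time : Int) (out : Int) : Decidable (Spec_total_lateness batches setup_time out) := by unfold Spec_total_lateness; infer_instance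

-- ===== CLAIM (what is proved, stated in full; the proofs are below) =====
def Claim_equal_total_lateness : Prop := ∀ (batches : List (List (Int × Int × Int))) (setup_time : Int), Dom_total_lateness batches setup_time → Spec_total_lateness batches setup_time (total_lateness batches setup_time)


-- ===== LEMMAS AND PROOFS =====
-- spine of both computations: lateness of the non-empty batches from clock t / first-flag
def pvG (setup_time : Int) (ne : List (List (Int × Int × Int))) (t : Int) (first : Bool) : Int :=
  match ne with
  | [] => 0
  | b :: rest =>
    let t' := (if first then t else t + setup_time) + b.foldl (fun a x => a + x.2.1) 0
    batch_lateness b t' + pvG setup_time rest t' false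

theorem pvA_fold (s : Int) (bs : List (List (Int × Int × Int))) :
    ∀ (total t : Int) (first : Bool),
    (bs.foldl (fun (st : Int × Int × Bool) batch =>
      if batch = [] then st
      else
        let t1 := if st.2.2 then st.2.1 else st.2.1 + s
        let t2 := t1 + batch.foldl (fun a x => a + x.2.1) 0
        (st.1 + batch_lateness batch t2, t2, false)) (total, t, first)).1
      = total + pvG s (bs.filter (fun b => b ≠ [])) t first := by
  induction bs with
  | nil => intro total t first; simp [pvG]
  | cons b rest ih =>
    intro total t first
    by_cases hb : b = []
    · subst hb; simpa using ih total t first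
    · simp only [List.foldl_cons, List.filter_cons, hb, decide_not]
      rw [ih]
      simp [pvG]
      ring

-- sum of the per-batch processing sums
def pvSumP (ne : List (List (Int × Int × Int))) : Int :=
  (ne.map (fun b => b.foldl (fun a x => a + x.2.1) 0)).sum

theorem pvP_shift (b : List (Int × Int × Int)) :
    ∀ a : Int, b.foldl (fun a2 x => a2 + x.2.1) a = a + b.foldl (fun a2 x => a2 + x.2.1) 0 := by
  induction b with
  | nil => intro a; simp
  | cons x xs ih =>
    intro a
    simp only [List.foldl_cons]
    rw [ih (a + x.2.1), ih (0 + x.2.1)]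
    ring

theorem pvCt0_fold (ne : List (List (Int × Int × Int))) :
    ∀ a : Int, ne.foldl (fun a b => b.foldl (fun a2 x => a2 + x.2.1) a) a = a + pvSumP ne := by
  induction ne with
  | nil => intro a; simp [pvSumP]
  | cons b rest ih =>
    intro a
    simp only [List.foldl_cons]
    rw [pvP_shift b a, ih]
    simp [pvSumP]
    ring

-- the backward walk over the reversed list computes the same spine (foldr form)
theorem pvB_rev (s : Int) (ne : List (List (Int × Int × Int))) (hne : ne ≠ []) :
    ∀ (t c : Int) (first : Bool),
    c = t + pvSumP ne + s * ((ne.length : Int) - 1) + (if first then 0 else s) →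
    (List.foldr (fun (b : List (Int × Int × Int)) (st : Int × Int) =>
        (st.1 + b.foldl (fun a x => a + max 0 (st.2 - x.2.2)) 0,
         st.2 - (b.foldl (fun a x => a + x.2.1) 0 + s))) (0, c) ne)
     = (pvG s ne t first, if first then t - s else t) := by
  induction ne with
  | nil => exact absurd rfl hne
  | cons b rest ih =>
    intro t c first hc
    by_cases hr : rest = []
    · subst hr
      have hcT : c = (if first then t else t + s) + b.foldl (fun a x => a + x.2.1) 0 := by
        rw [hc]; simp [pvSumP]; split_ifs <;> ring
      subst hcT
      simp only [List.foldr_cons, List.foldr_nil, pvG, batch_lateness]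
      rw [Prod.mk.injEq]
      constructor
      · ring
      · split_ifs <;> ring
    · have hcrest : c = ((if first then t else t + s) + b.foldl (fun a x => a + x.2.1) 0)
          + pvSumP rest + s * ((rest.length : Int) - 1) + (if (false : Bool) then 0 else s) := by
        rw [hc]; simp [pvSumP, List.length_cons]; split_ifs <;> ring
      simp only [List.foldr_cons]
      rw [ih hr ((if first then t else t + s) + b.foldl (fun a x => a + x.2.1) 0) c false hcrest]
      simp only [pvG, batch_lateness]
      rw [Prod.mk.injEq]
      constructor
      · simp only [Bool.false_eq_true, if_false]
        ring
      · simp only [Bool.false_eq_true, if_false]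
        split_ifs <;> ring

-- same statement for the foldl over the reversed list (the shape Port B uses)
theorem pvB_rev' (s : Int) (ne : List (List (Int × Int × Int))) (hne : ne ≠ [])
    (t c : Int) (first : Bool)
    (hc : c = t + pvSumP ne + s * ((ne.length : Int) - 1) + (if first then 0 else s)) :
    (ne.reverse.foldl (fun (st : Int × Int) b =>
        (st.1 + b.foldl (fun a x => a + max 0 (st.2 - x.2.2)) 0,
         st.2 - (b.foldl (fun a x => a + x.2.1) 0 + s))) (0, c))
     = (pvG s ne t first, if first then t - s else t) := by
  rw [List.foldl_reverse]
  exact pvB_rev s ne hne t c first hc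

-- ===== VERDICT (by name: the statement is the Claim_ definition above) =====
theorem total_lateness_spec : Claim_equal_total_lateness := by
  intro batches setup_time _
  unfold Spec_total_lateness total_lateness total_lateness_alt
  rw [pvA_fold]
  by_cases h : batches.filter (fun b => b ≠ []) = []
  · rw [h]; simp [pvG]
  · simp only [if_neg h]
    rw [pvCt0_fold]
    rw [pvB_rev' setup_time (batches.filter (fun b => b ≠ [])) h 0
      (0 + pvSumP (batches.filter (fun b => b ≠ []))
        + setup_time * (((batches.filter (fun b => b ≠ [])).length : Int) - 1)) true (by simp)]
    simp
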